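-- pv_equiv track=rewrite | github.com/areddish/aoc2023 | day10/day10.py | can_reach_path
-- ===== SOURCE A (Python) =====
-- N = 0
--
-- E = 1
--
-- S = 2
--
-- W = 3
--
-- def get_right_dir(dir):
--     if dir == N:
--         return E
--     if dir == E:
--         return S
--     if dir == S:
--         return W
--     if dir == W:
--         return N
--
-- def can_reach_path(board, path, cur):
--     x,y = cur
--     if cur in path:
--         return False
--     if board[y][x] != ".":
--         return False
--
--     hit_path = 0
--     # up
--     for ny in range(y,-1,-1):
--         if path.get((x,ny), None) == get_right_dir(N):
--             hit_path += 1
--             break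
--
--     # down
--     for ny in range(y,len(board),1):
--         #if x in path[ny]:
--         if path.get((x,ny), None) == get_right_dir(S):
--             hit_path += 1
--             break
--
--     # left
--     for nx in range(x,-1,-1):
--         #if nx in path[y]:
--         if path.get((nx,y), None) == get_right_dir(E):
--             hit_path += 1
--             break
--
--     # right
--     for nx in range(x,len(board[0]),1):
--         #if nx in path[y]:
--         if path.get((nx,y), None) == get_right_dir(W):
--             hit_path += 1
--             break
--
--     return hit_path == 4
-- ===== SOURCE B (Python) =====
-- N = 0
-- E = 1
-- S = 2
-- W = 3
--
-- def can_reach_path(board, path, cur):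
--     x, y = cur
--     if cur in path:
--         return False
--     if board[y][x] != ".":
--         return False
--     h = len(board)
--     w = len(board[0])
--     up = down = left = right = False
--     for (px, py), pv in path.items():
--         if px == x:
--             if 0 <= py <= y and pv == E:
--                 up = True
--             if y <= py < h and pv == W:
--                 down = True
--         if py == y:
--             if 0 <= px <= x and pv == S:
--                 left = True
--             if x <= px < w and pv == N:
--                 right = True
--     return up and down and left and right
-- ===== Notes on version B (the rewrite author's own statement) =====
-- stated objective: faster
-- what changed: Replaces the four per-direction ray scans (each probing the dict once per board cell along the ray) by a single pass over path.items() that sets four direction flags with bounds tests; Pre_ excludes inputs where A raises IndexError (cur not a valid board index when absent from path) and association lists with duplicate keys, which cannot arise from a Python dict.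
import Mathlib
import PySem

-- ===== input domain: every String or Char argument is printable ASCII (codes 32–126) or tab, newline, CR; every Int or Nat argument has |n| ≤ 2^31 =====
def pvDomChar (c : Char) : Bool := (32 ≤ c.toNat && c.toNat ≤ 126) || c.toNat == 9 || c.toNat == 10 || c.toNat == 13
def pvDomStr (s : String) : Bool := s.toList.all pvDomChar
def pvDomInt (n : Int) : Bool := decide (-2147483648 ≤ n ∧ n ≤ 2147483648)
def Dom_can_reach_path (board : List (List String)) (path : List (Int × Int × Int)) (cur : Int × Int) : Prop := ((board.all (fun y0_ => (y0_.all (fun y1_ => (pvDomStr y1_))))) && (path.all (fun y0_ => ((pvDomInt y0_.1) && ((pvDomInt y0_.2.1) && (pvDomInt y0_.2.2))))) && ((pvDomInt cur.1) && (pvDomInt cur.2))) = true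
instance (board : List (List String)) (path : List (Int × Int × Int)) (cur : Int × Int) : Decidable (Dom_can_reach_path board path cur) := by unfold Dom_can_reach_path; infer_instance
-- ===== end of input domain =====

-- B replaces A's four per-direction ray scans (one dict probe per cell along each ray)
-- by one pass over the path items setting four direction flags; equivalence is proved
-- on inputs where A returns (valid board index when cur is off the path, distinct keys).


-- ===== PORT A =====
-- path is a Python dict keyed by (x,y): ported as an association list, lookup = first match
def pathGet (path : List (Int × Int × Int)) (a b : Int) : Option Int :=
  (path.find? (fun p => p.1 == a && p.2.1 == b)).map (·.2.2)

def get_right_dir (dir : Int) : Option Int :=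
  if dir = 0 then some 1
  else if dir = 1 then some 2
  else if dir = 2 then some 3
  else if dir = 3 then some 0
  else none

def can_reach_path (board : List (List String)) (path : List (Int × Int × Int)) (cur : Int × Int) : Bool :=
  let x := cur.1
  let y := cur.2
  if path.any (fun p => p.1 == x && p.2.1 == y) then false
  else if PySem.List.pyGetD (PySem.List.pyGetD board y []) x "" ≠ "." then false
    -- board[y][x]: IndexError outside Pre_, where pyGetD's default is never used
  else
    -- each 'for …: if …: hit_path += 1; break' loop contributes 1 iff some cell on the ray hits
    let hit1 : Int := if (PySem.List.pyRange y (-1) (-1)).any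
        (fun ny => pathGet path x ny == get_right_dir 0) then 1 else 0
    let hit2 : Int := if (PySem.List.pyRange y (board.length : Int) 1).any
        (fun ny => pathGet path x ny == get_right_dir 2) then 1 else 0
    let hit3 : Int := if (PySem.List.pyRange x (-1) (-1)).any
        (fun nx => pathGet path nx y == get_right_dir 1) then 1 else 0
    let hit4 : Int := if (PySem.List.pyRange x ((PySem.List.pyGetD board 0 []).length : Int) 1).any
        (fun nx => pathGet path nx y == get_right_dir 3) then 1 else 0
    decide (hit1 + hit2 + hit3 + hit4 = 4)

-- ===== PORT B =====
def can_reach_path_alt (board : List (List String)) (path : List (Int × Int × Int)) (cur : Int × Int) : Bool :=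
  let x := cur.1
  let y := cur.2
  if path.any (fun p => p.1 == x && p.2.1 == y) then false
  else if PySem.List.pyGetD (PySem.List.pyGetD board y []) x "" ≠ "." then false
  else
    let h : Int := board.length
    let w : Int := (PySem.List.pyGetD board 0 []).length
    let s := path.foldl (fun (st : Bool × Bool × Bool × Bool) p =>
      (st.1 || (p.1 == x && decide (0 ≤ p.2.1 ∧ p.2.1 ≤ y) && p.2.2 == 1),
       st.2.1 || (p.1 == x && decide (y ≤ p.2.1 ∧ p.2.1 < h) && p.2.2 == 3),
       st.2.2.1 || (p.2.1 == y && decide (0 ≤ p.1 ∧ p.1 ≤ x) && p.2.2 == 2),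
       st.2.2.2 || (p.2.1 == y && decide (x ≤ p.1 ∧ p.1 < w) && p.2.2 == 0)))
      (false, false, false, false)
    s.1 && s.2.1 && s.2.2.1 && s.2.2.2

-- ===== PRECONDITION & SPEC =====
-- Pre_ excludes (i) inputs where A raises IndexError (cur off the path but not a valid
-- Python index into the board), and (ii) association lists with duplicate (x,y) keys,
-- which do not represent any Python dict (the Python argument is a dict, so keys are unique).
def Pre_can_reach_path (board : List (List String)) (path : List (Int × Int × Int)) (cur : Int × Int) : Prop :=
  (path.map (fun p => (p.1, p.2.1))).Nodup ∧
  ((∃ p ∈ path, p.1 = cur.1 ∧ p.2.1 = cur.2) ∨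
   (PySem.Raise.InRange board.length cur.2 ∧
    PySem.Raise.InRange (PySem.List.pyGetD board cur.2 []).length cur.1))
instance (board : List (List String)) (path : List (Int × Int × Int)) (cur : Int × Int) : Decidable (Pre_can_reach_path board path cur) := by unfold Pre_can_reach_path; infer_instance

def pvWitness_can_reach_path : List (List String) × (List (Int × Int × Int)) × (Int × Int) :=
  ([[".", "."], [".", "."]], [(0, 0, 1), (1, 1, 3)], (0, 1))

def Spec_can_reach_path (board : List (List String)) (path : List (Int × Int × Int)) (cur : Int × Int) (out : Bool) : Prop := out = can_reach_path_alt board path cur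
instance (board : List (List String)) (path : List (Int × Int × Int)) (cur : Int × Int) (out : Bool) : Decidable (Spec_can_reach_path board path cur out) := by unfold Spec_can_reach_path; infer_instance

-- ===== CLAIM (what is proved, stated in full; the proofs are below) =====
def Claim_equal_can_reach_path : Prop := ∀ (board : List (List String)) (path : List (Int × Int × Int)) (cur : Int × Int), Dom_can_reach_path board path cur → Pre_can_reach_path board path cur → Spec_can_reach_path board path cur (can_reach_path board path cur)

-- ===== LEMMAS AND PROOFS =====

lemma grd0 : get_right_dir 0 = some 1 := by decide
lemma grd1 : get_right_dir 1 = some 2 := by decide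
lemma grd2 : get_right_dir 2 = some 3 := by decide
lemma grd3 : get_right_dir 3 = some 0 := by decide

-- first-match lookup characterised as unique-match membership, under distinct keys
lemma pathGet_eq_some_iff (path : List (Int × Int × Int))
    (hnd : (path.map (fun p => (p.1, p.2.1))).Nodup) (a b v : Int) :
    pathGet path a b = some v ↔ ∃ p ∈ path, p.1 = a ∧ p.2.1 = b ∧ p.2.2 = v := by
  constructor
  · intro h
    unfold pathGet at h
    rcases Option.map_eq_some_iff.mp h with ⟨q, hq, hv⟩
    have hmem := List.mem_of_find?_eq_some hq
    have hpred := List.find?_some hq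
    simp only [Bool.and_eq_true, beq_iff_eq] at hpred
    exact ⟨q, hmem, hpred.1, hpred.2, hv⟩
  · rintro ⟨p, hp, h1, h2, h3⟩
    have hs : (path.find? (fun q => q.1 == a && q.2.1 == b)).isSome := by
      rw [List.find?_isSome]
      exact ⟨p, hp, by simp [h1, h2]⟩
    rcases Option.isSome_iff_exists.mp hs with ⟨q, hq⟩
    have hqmem := List.mem_of_find?_eq_some hq
    have hqpred := List.find?_some hq
    simp only [Bool.and_eq_true, beq_iff_eq] at hqpred
    have : q = p := by
      have := List.inj_on_of_nodup_map hnd hqmem hp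
      have hkey : (fun p : Int × Int × Int => (p.1, p.2.1)) q = (fun p : Int × Int × Int => (p.1, p.2.1)) p := by
        simp [hqpred.1, hqpred.2, h1, h2]
      exact this hkey
    unfold pathGet
    rw [hq]
    simp [this, h3]

lemma fold_flags (path : List (Int × Int × Int)) (f1 f2 f3 f4 : Int × Int × Int → Bool)
    (a b c d : Bool) :
    path.foldl (fun (st : Bool × Bool × Bool × Bool) p =>
      (st.1 || f1 p, st.2.1 || f2 p, st.2.2.1 || f3 p, st.2.2.2 || f4 p)) (a, b, c, d)
    = (a || path.any f1, b || path.any f2, c || path.any f3, d || path.any f4) := by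
  induction path generalizing a b c d with
  | nil => simp
  | cons p ps ih =>
    simp only [List.foldl_cons, List.any_cons, ih, Bool.or_assoc]

lemma ray_up (path : List (Int × Int × Int))
    (hnd : (path.map (fun p => (p.1, p.2.1))).Nodup) (x y : Int) :
    (PySem.List.pyRange y (-1) (-1)).any (fun ny => pathGet path x ny == get_right_dir 0)
    = path.any (fun p => p.1 == x && decide (0 ≤ p.2.1 ∧ p.2.1 ≤ y) && p.2.2 == 1) := by
  rw [Bool.eq_iff_iff]
  simp only [List.any_eq_true, PySem.List.mem_pyRange_neg_one, grd0,
    beq_iff_eq, Bool.and_eq_true, decide_eq_true_eq]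
  constructor
  · rintro ⟨ny, ⟨h0, hy⟩, hget⟩
    rcases (pathGet_eq_some_iff path hnd x ny 1).mp hget with ⟨p, hp, e1, e2, e3⟩
    exact ⟨p, hp, ⟨e1, by omega, by omega⟩, e3⟩
  · rintro ⟨p, hp, ⟨e1, h0, hy⟩, e3⟩
    exact ⟨p.2.1, ⟨by omega, hy⟩,
      (pathGet_eq_some_iff path hnd x p.2.1 1).mpr ⟨p, hp, e1, rfl, e3⟩⟩

lemma ray_down (path : List (Int × Int × Int))
    (hnd : (path.map (fun p => (p.1, p.2.1))).Nodup) (x y h : Int) :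
    (PySem.List.pyRange y h 1).any (fun ny => pathGet path x ny == get_right_dir 2)
    = path.any (fun p => p.1 == x && decide (y ≤ p.2.1 ∧ p.2.1 < h) && p.2.2 == 3) := by
  rw [Bool.eq_iff_iff]
  simp only [List.any_eq_true, PySem.List.mem_pyRange_one, grd2,
    beq_iff_eq, Bool.and_eq_true, decide_eq_true_eq]
  constructor
  · rintro ⟨ny, ⟨h0, hy⟩, hget⟩
    rcases (pathGet_eq_some_iff path hnd x ny 3).mp hget with ⟨p, hp, e1, e2, e3⟩
    exact ⟨p, hp, ⟨e1, by omega, by omega⟩, e3⟩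
  · rintro ⟨p, hp, ⟨e1, h0, hy⟩, e3⟩
    exact ⟨p.2.1, ⟨h0, hy⟩,
      (pathGet_eq_some_iff path hnd x p.2.1 3).mpr ⟨p, hp, e1, rfl, e3⟩⟩

lemma ray_left (path : List (Int × Int × Int))
    (hnd : (path.map (fun p => (p.1, p.2.1))).Nodup) (x y : Int) :
    (PySem.List.pyRange x (-1) (-1)).any (fun nx => pathGet path nx y == get_right_dir 1)
    = path.any (fun p => p.2.1 == y && decide (0 ≤ p.1 ∧ p.1 ≤ x) && p.2.2 == 2) := by
  rw [Bool.eq_iff_iff]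
  simp only [List.any_eq_true, PySem.List.mem_pyRange_neg_one, grd1,
    beq_iff_eq, Bool.and_eq_true, decide_eq_true_eq]
  constructor
  · rintro ⟨nx, ⟨h0, hx⟩, hget⟩
    rcases (pathGet_eq_some_iff path hnd nx y 2).mp hget with ⟨p, hp, e1, e2, e3⟩
    exact ⟨p, hp, ⟨e2, by omega, by omega⟩, e3⟩
  · rintro ⟨p, hp, ⟨e2, h0, hx⟩, e3⟩
    exact ⟨p.1, ⟨by omega, hx⟩,
      (pathGet_eq_some_iff path hnd p.1 y 2).mpr ⟨p, hp, rfl, e2, e3⟩⟩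

lemma ray_right (path : List (Int × Int × Int))
    (hnd : (path.map (fun p => (p.1, p.2.1))).Nodup) (x y w : Int) :
    (PySem.List.pyRange x w 1).any (fun nx => pathGet path nx y == get_right_dir 3)
    = path.any (fun p => p.2.1 == y && decide (x ≤ p.1 ∧ p.1 < w) && p.2.2 == 0) := by
  rw [Bool.eq_iff_iff]
  simp only [List.any_eq_true, PySem.List.mem_pyRange_one, grd3,
    beq_iff_eq, Bool.and_eq_true, decide_eq_true_eq]
  constructor
  · rintro ⟨nx, ⟨h0, hx⟩, hget⟩
    rcases (pathGet_eq_some_iff path hnd nx y 0).mp hget with ⟨p, hp, e1, e2, e3⟩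
    exact ⟨p, hp, ⟨e2, by omega, by omega⟩, e3⟩
  · rintro ⟨p, hp, ⟨e2, h0, hx⟩, e3⟩
    exact ⟨p.1, ⟨h0, hx⟩,
      (pathGet_eq_some_iff path hnd p.1 y 0).mpr ⟨p, hp, rfl, e2, e3⟩⟩

-- ===== VERDICT (by name: the statement is the Claim_ definition above) =====
theorem can_reach_path_spec : Claim_equal_can_reach_path := by
  intro board path cur _hdom hpre
  unfold Spec_can_reach_path can_reach_path can_reach_path_alt
  obtain ⟨hnd, _⟩ := hpre
  simp only []
  split
  · rfl
  · split
    · rfl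
    · rw [fold_flags, ray_up path hnd, ray_down path hnd, ray_left path hnd, ray_right path hnd]
      simp only [Bool.false_or]
      set b1 := path.any _
      set b2 := path.any _
      set b3 := path.any _
      set b4 := path.any _
      cases b1 <;> cases b2 <;> cases b3 <;> cases b4 <;> decide
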